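-- pv_equiv track=rewrite | github.com/domsooch/PCRSim | src/Probe/probe.py | CyclesToSynth
-- ===== SOURCE A (Python) =====
-- def CyclesToSynth(seq, word = 'acgt', Verbose = 0):
--     """CyclesToSynth
--     |(seq,word = 'acgt')
--     |Num_cycles (integer)
--     |This function calculates the number of cycles required to synth oligo
--     |
--     |
--     """
--     seq = seq.lower()
--     seq = list(seq)
--     cycle = 0
--     b = 2
--     while len(seq):
--         basemade = ''
--         cycle +=1
--         b +=1;b = b%4
--         base = word[b]
--         if not(seq[-1] in word):
--             return None
--         if seq[-1] == base:
--             basemade = seq.pop(-1)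
--         if Verbose:
--             print ('Cycle %i base %s %i basemade %s' %(cycle, base, b, basemade))
--     return cycle
-- ===== SOURCE B (Python) =====
-- def CyclesToSynth(seq, word='acgt', Verbose=0):
--     # Single pass over reversed(seq.lower()): add the cyclic distance from the
--     # current synthesis position to each base instead of simulating every cycle.
--     cycle = 0
--     b = 2
--     for c in reversed(seq.lower()):
--         if c not in word:
--             return None
--         ds = [((t - b - 1) % 4) + 1 for t in range(4) if word[t] == c]
--         d = min(ds)
--         cycle += d
--         b = (b + d) % 4
--     return cycle
-- ===== Notes on version B (the rewrite author's own statement) =====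
-- stated objective: alternative
-- what changed: Replaces A's cycle-by-cycle while-loop simulation (incrementing the base pointer once per cycle and popping at matches) by a single pass over the reversed sequence that adds, for each base, the cyclic distance to its nearest matching position in word[:4], computed arithmetically as min(((t-b-1)%4)+1 over matching t).
-- outside the precondition, e.g. on CyclesToSynth('a', 'xy', 0): A raises IndexError, B returns None; on CyclesToSynth('x', 'acgtx', 0): A does not finish within the time limit, B raises ValueError
import Mathlib
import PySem

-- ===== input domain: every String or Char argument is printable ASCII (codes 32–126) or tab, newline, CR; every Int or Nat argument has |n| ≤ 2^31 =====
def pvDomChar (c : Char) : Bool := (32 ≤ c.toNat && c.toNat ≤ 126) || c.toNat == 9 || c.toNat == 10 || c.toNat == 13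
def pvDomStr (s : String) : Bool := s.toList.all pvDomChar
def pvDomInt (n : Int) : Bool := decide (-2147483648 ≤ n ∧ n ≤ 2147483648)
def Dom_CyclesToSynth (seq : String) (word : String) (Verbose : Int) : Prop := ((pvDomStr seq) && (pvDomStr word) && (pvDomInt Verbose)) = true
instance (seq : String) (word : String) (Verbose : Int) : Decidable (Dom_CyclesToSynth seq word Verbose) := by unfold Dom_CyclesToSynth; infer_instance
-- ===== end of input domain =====

-- B replaces A's cycle-by-cycle synthesis simulation (with list.pop) by a single pass over the
-- reversed sequence that adds, per base, the cyclic distance to the next matching word position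
-- (objective: alternative decomposition; return value only — A's Verbose printing is not modelled).

-- ===== PORT A =====
-- The Python 'while' is made total with fuel 4*len(seq)+1, which suffices whenever the Python
-- loop terminates (a popped char costs at most 4 cycles); fuel exhaustion (Python: divergence),
-- IndexError on word[b] and 'return None' all become none.
def pvLoopA (w : List Char) : Nat → List Char → Int → Int → Option Int
  | 0, _, _, _ => none
  | fuel + 1, seq, cycle, b =>
    if seq.length = 0 then some cycle
    else
      let cycle := cycle + 1
      let b := PySem.Int.mod (b + 1) 4
      match PySem.List.pyGet? w b with
      | none => none                                   -- IndexError: word[b]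
      | some base =>
        match PySem.List.pyGet? seq (-1) with
        | none => none                                 -- unreachable: seq is nonempty here
        | some last =>
          if !(w.contains last) then none              -- 'seq[-1] in word': single-char membership
          else
            -- seq.pop(-1) on a nonempty list = dropLast
            pvLoopA w fuel (if last == base then seq.dropLast else seq) cycle b

def CyclesToSynth (seq : String) (word : String) (Verbose : Int) : Option Int :=
  let s := (PySem.Str.lower seq).toList
  pvLoopA word.toList (4 * s.length + 1) s 0 2

-- ===== PORT B =====
-- ds = [((t - b - 1) % 4) + 1 for t in range(4) if word[t] == c]; d = min(ds).
-- word[t] raises IndexError when len(word) < 4 and min([]) raises ValueError: both become none.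
def pvAltStep (w : List Char) (c : Char) (b : Int) : Option Int :=
  if w.length < 4 then none
  else
    let ds := (List.range 4).filterMap fun (t : Nat) =>
      if w[t]? = some c then some (PySem.Int.mod ((t : Int) - b - 1) 4 + 1) else none
    PySem.List.min? ds (fun x => x)

def pvAltGo (w : List Char) : List Char → Int → Int → Option Int
  | [], cycle, _ => some cycle
  | c :: rest, cycle, b =>
    if !(w.contains c) then none                       -- 'if c not in word: return None'
    else
      match pvAltStep w c b with
      | none => none
      | some d => pvAltGo w rest (cycle + d) (PySem.Int.mod (b + d) 4)

def CyclesToSynth_alt (seq : String) (word : String) (Verbose : Int) : Option Int :=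
  pvAltGo word.toList (PySem.Str.lower seq).toList.reverse 0 2

-- ===== PRECONDITION & SPEC =====
-- Pre_ = exactly the inputs on which the Python A returns normally (the port-level equality
-- below holds on all of Dom, since both ports map A's IndexError/divergence and B's
-- IndexError/ValueError to none; Pre_ is needed because Python A itself raises/diverges there): with a nonempty sequence the
-- word needs at least 4 chars (else word[b] raises IndexError on the first cycle), and scanning
-- the lowered sequence from its end, the first char that is not in word[:4] (if any) must not be
-- in word at all (in word[:4] it is popped; in word but beyond word[:4] the loop never ends).
def Pre_CyclesToSynth (seq : String) (word : String) (Verbose : Int) : Prop :=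
  seq.toList = [] ∨
    (4 ≤ word.toList.length ∧
      (((PySem.Chars.lower seq.toList).reverse.dropWhile
          (fun c => (word.toList.take 4).contains c)).head?.all
        (fun c => !(word.toList.contains c)) = true))
instance (seq : String) (word : String) (Verbose : Int) : Decidable (Pre_CyclesToSynth seq word Verbose) := by unfold Pre_CyclesToSynth; infer_instance

def pvWitness_CyclesToSynth : String × String × Int := ("gaTx", "acgt", 0)

def Spec_CyclesToSynth (seq : String) (word : String) (Verbose : Int) (out : Option Int) : Prop := out = CyclesToSynth_alt seq word Verbose
instance (seq : String) (word : String) (Verbose : Int) (out : Option Int) : Decidable (Spec_CyclesToSynth seq word Verbose out) := by unfold Spec_CyclesToSynth; infer_instance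

-- ===== CLAIM (what is proved, stated in full; the proofs are below) =====
def Claim_equal_CyclesToSynth : Prop := ∀ (seq : String) (word : String) (Verbose : Int), Dom_CyclesToSynth seq word Verbose → Pre_CyclesToSynth seq word Verbose → Spec_CyclesToSynth seq word Verbose (CyclesToSynth seq word Verbose)

-- ===== LEMMAS AND PROOFS =====

-- Floor-mod decomposition: mod a 4 is the residue of a in [0,4).
theorem pvModD (a : Int) : ∃ q, q * 4 + PySem.Int.mod a 4 = a ∧ 0 ≤ PySem.Int.mod a 4 ∧ PySem.Int.mod a 4 < 4 :=
  ⟨PySem.Int.floordiv a 4, PySem.Int.floordiv_mul_add_mod a 4,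
   PySem.Int.mod_nonneg a (by norm_num), PySem.Int.mod_lt a (by norm_num)⟩

theorem pvMod_congr {x y : Int} (h : (4:Int) ∣ (x - y)) : PySem.Int.mod x 4 = PySem.Int.mod y 4 := by
  obtain ⟨q1, h1, h1a, h1b⟩ := pvModD x
  obtain ⟨q2, h2, h2a, h2b⟩ := pvModD y
  obtain ⟨k, hk⟩ := h
  omega

theorem pvMod_small {a : Int} (h0 : 0 ≤ a) (h4 : a < 4) : PySem.Int.mod a 4 = a := by
  obtain ⟨q, h, ha, hb⟩ := pvModD a
  omega

-- the word position compared in the j-th cycle after state b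
def pvIdx (b : Int) (j : Nat) : Nat := (PySem.Int.mod (b + j) 4).toNat

theorem pvIdx_lt (b : Int) (j : Nat) : pvIdx b j < 4 := by
  unfold pvIdx
  obtain ⟨q, h, ha, hb⟩ := pvModD (b + j)
  omega

theorem pvIdx_cast (b : Int) (j : Nat) : (pvIdx b j : Int) = PySem.Int.mod (b + j) 4 := by
  unfold pvIdx
  obtain ⟨q, h, ha, hb⟩ := pvModD (b + j)
  omega

theorem pvMod_shift (b x : Int) : PySem.Int.mod (PySem.Int.mod (b + 1) 4 + x) 4 = PySem.Int.mod (b + 1 + x) 4 := by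
  apply pvMod_congr
  obtain ⟨q, h, ha, hb⟩ := pvModD (b + 1)
  exact ⟨-q, by omega⟩

theorem pvIdx_shift (b : Int) (j : Nat) : pvIdx (PySem.Int.mod (b + 1) 4) j = pvIdx b (j + 1) := by
  unfold pvIdx
  have h : b + 1 + (j : Int) = b + ((j + 1 : Nat) : Int) := by push_cast; ring
  rw [pvMod_shift, h]

-- cyclic distance value: the candidate produced at position pvIdx b k has value k
theorem pvVal (b : Int) (k : Nat) (hk1 : 1 ≤ k) (hk4 : k ≤ 4) :
    PySem.Int.mod ((pvIdx b k : Int) - b - 1) 4 + 1 = (k : Int) := by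
  rw [pvIdx_cast]
  have h : PySem.Int.mod (PySem.Int.mod (b + k) 4 - b - 1) 4 = PySem.Int.mod ((k : Int) - 1) 4 := by
    apply pvMod_congr
    obtain ⟨q, h, ha, hb⟩ := pvModD (b + k)
    exact ⟨-q, by omega⟩
  rw [h, pvMod_small (by omega) (by omega)]
  omega

-- every word position t < 4 is pvIdx b k for exactly one k in [1,4]
theorem pvIdx_complete (b : Int) (t : Nat) (ht : t < 4) :
    ∃ k, 1 ≤ k ∧ k ≤ 4 ∧ pvIdx b k = t := by
  refine ⟨(PySem.Int.mod ((t : Int) - b - 1) 4).toNat + 1, by omega, ?_, ?_⟩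
  · obtain ⟨q, h, ha, hb⟩ := pvModD ((t : Int) - b - 1)
    omega
  · unfold pvIdx
    obtain ⟨q, h, ha, hb⟩ := pvModD ((t : Int) - b - 1)
    have : PySem.Int.mod (b + ((PySem.Int.mod ((t : Int) - b - 1) 4).toNat + 1 : Nat)) 4 = (t : Int) := by
      have hc : PySem.Int.mod (b + ((PySem.Int.mod ((t : Int) - b - 1) 4).toNat + 1 : Nat)) 4
          = PySem.Int.mod (t : Int) 4 := by
        apply pvMod_congr
        exact ⟨-q, by push_cast; omega⟩
      rw [hc, pvMod_small (by omega) (by omega)]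
    omega

-- ---- single-step unfoldings of A's while loop on seq = (c :: rest).reverse ----

theorem pvGet_base (w : List Char) (b : Int) (h4 : 4 ≤ w.length) :
    PySem.List.pyGet? w (PySem.Int.mod (b + 1) 4) = some (w[pvIdx b 1]'(by have := pvIdx_lt b 1; omega)) := by
  have h0 : (0:Int) ≤ PySem.Int.mod (b + 1) 4 := PySem.Int.mod_nonneg _ (by norm_num)
  have h1 : PySem.Int.mod (b + 1) 4 < (w.length : Int) := by
    have := PySem.Int.mod_lt (b + 1) (b := 4) (by norm_num)
    omega
  rw [PySem.List.pyGet?_eq_some_getElem w h0 h1]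
  congr 1

theorem pvStep_pop (w : List Char) (c : Char) (rest : List Char) (fuel : Nat) (cycle b : Int)
    (h4 : 4 ≤ w.length) (hcont : w.contains c = true)
    (hbe : c = w[pvIdx b 1]'(by have := pvIdx_lt b 1; omega)) :
    pvLoopA w (fuel + 1) ((c :: rest).reverse) cycle b
      = pvLoopA w fuel rest.reverse (cycle + 1) (PySem.Int.mod (b + 1) 4) := by
  have hcm : c ∈ w := by simpa using hcont
  simp only [pvLoopA, pvGet_base w b h4,
    List.reverse_cons, PySem.List.pyGet?_neg_one, List.dropLast_concat]
  rw [← List.reverse_cons]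
  simp [List.getLast?_reverse, hcm, ← hbe]

theorem pvStep_skip (w : List Char) (c : Char) (rest : List Char) (fuel : Nat) (cycle b : Int)
    (h4 : 4 ≤ w.length) (hcont : w.contains c = true)
    (hbe : c ≠ w[pvIdx b 1]'(by have := pvIdx_lt b 1; omega)) :
    pvLoopA w (fuel + 1) ((c :: rest).reverse) cycle b
      = pvLoopA w fuel ((c :: rest).reverse) (cycle + 1) (PySem.Int.mod (b + 1) 4) := by
  have hcm : c ∈ w := by simpa using hcont
  simp only [pvLoopA, pvGet_base w b h4,
    List.reverse_cons, PySem.List.pyGet?_neg_one, List.dropLast_concat]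
  rw [← List.reverse_cons]
  simp [List.getLast?_reverse, hcm, hbe]

theorem pvStep_stop (w : List Char) (c : Char) (rest : List Char) (fuel : Nat) (cycle b : Int)
    (h4 : 4 ≤ w.length) (hcont : w.contains c = false) :
    pvLoopA w (fuel + 1) ((c :: rest).reverse) cycle b = none := by
  have hcm : c ∉ w := by simpa using hcont
  simp only [pvLoopA, pvGet_base w b h4,
    List.reverse_cons, PySem.List.pyGet?_neg_one]
  rw [← List.reverse_cons]
  simp [List.getLast?_reverse, hcm]

-- c is in word but never at word[0..3]: A's loop only burns fuel (Python: diverges)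
theorem pvBurn (w : List Char) (c : Char) (rest : List Char)
    (h4 : 4 ≤ w.length) (hcont : w.contains c = true)
    (hno : ∀ t : Nat, t < 4 → w[t]? ≠ some c) :
    ∀ (fuel : Nat) (cycle b : Int), pvLoopA w fuel ((c :: rest).reverse) cycle b = none := by
  intro fuel
  induction fuel with
  | zero => intro cycle b; simp [pvLoopA]
  | succ f ih =>
    intro cycle b
    have hlt := pvIdx_lt b 1
    have hlt' : pvIdx b 1 < w.length := by omega
    have hbe : c ≠ w[pvIdx b 1]'hlt' := by
      intro h
      exact hno (pvIdx b 1) hlt (by rw [List.getElem?_eq_getElem hlt', h])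
    rw [pvStep_skip w c rest f cycle b h4 hcont hbe]
    exact ih _ _

-- k matching skip/pop steps of A's loop consume k fuel and pop c
theorem pvRun (w : List Char) (c : Char) (rest : List Char)
    (h4 : 4 ≤ w.length) (hcont : w.contains c = true) :
    ∀ (k : Nat) (b : Int) (fuel : Nat) (cycle : Int), 1 ≤ k → k ≤ 4 →
      w[pvIdx b k]? = some c →
      (∀ j, 1 ≤ j → j < k → w[pvIdx b j]? ≠ some c) →
      pvLoopA w (fuel + k) ((c :: rest).reverse) cycle b
        = pvLoopA w fuel rest.reverse (cycle + k) (PySem.Int.mod (b + k) 4) := by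
  intro k
  induction k with
  | zero => intro b fuel cycle h1; omega
  | succ k ih =>
    intro b fuel cycle _ hk4 hm hp
    rcases Nat.eq_zero_or_pos k with hk0 | hkpos
    · subst hk0
      have hlt := pvIdx_lt b 1
      have hlt' : pvIdx b 1 < w.length := by have := pvIdx_lt b 1; omega
      have hbe : c = w[pvIdx b 1]'hlt' := by
        rw [List.getElem?_eq_getElem hlt'] at hm
        exact (Option.some_inj.mp hm).symm
      rw [pvStep_pop w c rest fuel cycle b h4 hcont hbe]
      norm_num
    · have hlt' : pvIdx b 1 < w.length := by have := pvIdx_lt b 1; omega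
      have hbe : c ≠ w[pvIdx b 1]'hlt' := by
        intro h
        exact hp 1 le_rfl (by omega) (by rw [List.getElem?_eq_getElem hlt', h])
      have : fuel + (k + 1) = (fuel + k) + 1 := by omega
      rw [this, pvStep_skip w c rest (fuel + k) cycle b h4 hcont hbe]
      have hm' : w[pvIdx (PySem.Int.mod (b + 1) 4) k]? = some c := by rw [pvIdx_shift]; exact hm
      have hp' : ∀ j, 1 ≤ j → j < k → w[pvIdx (PySem.Int.mod (b + 1) 4) j]? ≠ some c := by
        intro j hj1 hjk
        rw [pvIdx_shift]
        exact hp (j + 1) (by omega) (by omega)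
      rw [ih (PySem.Int.mod (b + 1) 4) fuel (cycle + 1) hkpos (by omega) hm' hp']
      rw [pvMod_shift]
      congr 1
      · push_cast; ring
      · congr 1; push_cast; ring

-- B's per-char step computes exactly the number k of cycles A spends on char c
theorem pvMin_eq {l : List Int} {d : Int} (hm : d ∈ l) (hb : ∀ x ∈ l, d ≤ x) :
    PySem.List.min? l (fun x => x) = some d := by
  cases h : PySem.List.min? l (fun x => x) with
  | none =>
    rw [PySem.List.min?_eq_none_iff] at h
    subst h
    cases hm
  | some m =>
    have h1 := PySem.List.min?_mem h
    have h2 := PySem.List.min?_isMin h d hm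
    have h3 := hb m h1
    have hmd : m = d := le_antisymm h2 h3
    exact congrArg some hmd

theorem pvAltStep_eq (w : List Char) (c : Char) (b : Int) (k : Nat)
    (h4 : 4 ≤ w.length) (hk1 : 1 ≤ k) (hk4 : k ≤ 4)
    (hm : w[pvIdx b k]? = some c)
    (hp : ∀ j, 1 ≤ j → j < k → w[pvIdx b j]? ≠ some c) :
    pvAltStep w c b = some (k : Int) := by
  unfold pvAltStep
  rw [if_neg (by omega)]
  show PySem.List.min? ((List.range 4).filterMap fun (t : Nat) =>
      if w[t]? = some c then some (PySem.Int.mod ((t : Int) - b - 1) 4 + 1) else none)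
      (fun x => x) = some (k : Int)
  apply pvMin_eq
  · rw [List.mem_filterMap]
    refine ⟨pvIdx b k, List.mem_range.2 (pvIdx_lt b k), ?_⟩
    show (if w[pvIdx b k]? = some c
        then some (PySem.Int.mod ((pvIdx b k : Int) - b - 1) 4 + 1) else none) = some (k : Int)
    rw [if_pos hm, pvVal b k hk1 hk4]
  · intro x hx
    rw [List.mem_filterMap] at hx
    obtain ⟨t, htm, hft⟩ := hx
    rw [List.mem_range] at htm
    have hft' : (if w[t]? = some c
        then some (PySem.Int.mod ((t : Int) - b - 1) 4 + 1) else none) = some x := hft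
    by_cases hc : w[t]? = some c
    · rw [if_pos hc] at hft'
      obtain ⟨k', hk'1, hk'4, hk't⟩ := pvIdx_complete b t htm
      have hkk' : k ≤ k' := by
        by_contra hlt
        exact hp k' hk'1 (by omega) (hk't ▸ hc)
      have hx' : x = (k' : Int) := by
        rw [← Option.some_inj.mp hft', ← hk't, pvVal b k' hk'1 hk'4]
      omega
    · rw [if_neg hc] at hft'
      cases hft'

-- the main induction: A's fueled loop on rs.reverse equals B's pass over rs
theorem pvMain (w : List Char) (h4 : 4 ≤ w.length) :
    ∀ (rs : List Char) (fuel : Nat) (cycle b : Int), 4 * rs.length < fuel →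
      pvLoopA w fuel rs.reverse cycle b = pvAltGo w rs cycle b := by
  intro rs
  induction rs with
  | nil =>
    intro fuel cycle b hfuel
    obtain ⟨f, rfl⟩ : ∃ f, fuel = f + 1 := ⟨fuel - 1, by omega⟩
    simp [pvLoopA, pvAltGo]
  | cons c rest ih =>
    intro fuel cycle b hfuel
    by_cases hcont : w.contains c = true
    · by_cases hex : ∃ t : Nat, t < 4 ∧ w[t]? = some c
      · -- find the least matching cyclic offset k
        have hfind : ∃ k, 1 ≤ k ∧ k ≤ 4 ∧ w[pvIdx b k]? = some c ∧
            ∀ j, 1 ≤ j → j < k → w[pvIdx b j]? ≠ some c := by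
          by_cases h1 : w[pvIdx b 1]? = some c
          · exact ⟨1, le_rfl, by omega, h1, by omega⟩
          by_cases h2 : w[pvIdx b 2]? = some c
          · refine ⟨2, by omega, by omega, h2, ?_⟩
            intro j hj1 hj2
            have : j = 1 := by omega
            rw [this]; exact h1
          by_cases h3 : w[pvIdx b 3]? = some c
          · refine ⟨3, by omega, by omega, h3, ?_⟩
            intro j hj1 hj3
            interval_cases j
            · exact h1
            · exact h2
          · obtain ⟨t, ht, hmt⟩ := hex
            obtain ⟨k, hk1, hk4, hkt⟩ := pvIdx_complete b t ht
            have hk : k = 4 := by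
              interval_cases k
              · exact absurd (hkt ▸ hmt) h1
              · exact absurd (hkt ▸ hmt) h2
              · exact absurd (hkt ▸ hmt) h3
              · rfl
            refine ⟨4, by omega, le_rfl, by rw [← hk, hkt]; exact hmt, ?_⟩
            intro j hj1 hj4
            interval_cases j
            · exact h1
            · exact h2
            · exact h3
        obtain ⟨k, hk1, hk4, hm, hp⟩ := hfind
        have hfuel' : 4 * rest.length + 4 < fuel := by
          simpa [Nat.mul_add] using hfuel
        obtain ⟨f, rfl⟩ : ∃ f, fuel = f + k := ⟨fuel - k, by omega⟩
        rw [pvRun w c rest h4 hcont k b f cycle hk1 hk4 hm hp]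
        rw [ih f (cycle + k) (PySem.Int.mod (b + k) 4) (by omega)]
        have hcm : c ∈ w := by simpa using hcont
        simp [pvAltGo, hcm, pvAltStep_eq w c b k h4 hk1 hk4 hm hp]
      · -- c is in word but not among word[0..3]: both sides are none
        push Not at hex
        have hstep : pvAltStep w c b = none := by
          unfold pvAltStep
          rw [if_neg (by omega)]
          have : (List.range 4).filterMap (fun (t : Nat) =>
              if w[t]? = some c then some (PySem.Int.mod ((t : Int) - b - 1) 4 + 1) else none) = [] := by
            rw [List.filterMap_eq_nil_iff]
            intro t htm
            rw [List.mem_range] at htm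
            rw [if_neg (hex t htm)]
          rw [this]
          rw [PySem.List.min?_eq_none_iff]
        have hno : ∀ t : Nat, t < 4 → w[t]? ≠ some c := hex
        rw [pvBurn w c rest h4 hcont hno fuel cycle b]
        have hcm : c ∈ w := by simpa using hcont
        simp [pvAltGo, hcm, hstep]
    · rw [Bool.not_eq_true] at hcont
      obtain ⟨f, rfl⟩ : ∃ f, fuel = f + 1 := ⟨fuel - 1, by omega⟩
      rw [pvStep_stop w c rest f cycle b h4 hcont]
      have hcm : c ∉ w := by simpa using hcont
      simp [pvAltGo, hcm]

theorem CyclesToSynth_key : ∀ (seq word : String) (V : Int), CyclesToSynth seq word V = CyclesToSynth_alt seq word V := by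
  intro seq word V
  show pvLoopA word.toList (4 * (PySem.Str.lower seq).toList.length + 1) (PySem.Str.lower seq).toList 0 2
      = pvAltGo word.toList (PySem.Str.lower seq).toList.reverse 0 2
  generalize (PySem.Str.lower seq).toList = s
  generalize word.toList = w
  by_cases h4 : 4 ≤ w.length
  · have h := pvMain w h4 s.reverse (4 * s.length + 1) 0 2 (by simp)
    rw [List.reverse_reverse] at h
    exact h
  · -- fewer than 4 word chars: A hits IndexError at word[3]; B raises too: both none
    cases s with
    | nil => simp [pvLoopA, pvAltGo]
    | cons c0 s' =>
      have hA : pvLoopA w (4 * (c0 :: s').length + 1) (c0 :: s') 0 2 = none := by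
        simp only [pvLoopA, List.length_cons]
        rw [if_neg (by simp)]
        have hget : PySem.List.pyGet? w (PySem.Int.mod ((0:Int) + 1 + 1 + 1) 4) = none := by
          have hmod : PySem.Int.mod ((0:Int) + 1 + 1 + 1) 4 = 3 := by decide
          rw [hmod, PySem.List.pyGet?_eq_none_iff]
          simp [PySem.Raise.InRange]
          omega
        have hmod2 : PySem.Int.mod ((2:Int) + 1) 4 = PySem.Int.mod ((0:Int) + 1 + 1 + 1) 4 := by norm_num
        rw [hmod2, hget]
      rw [hA]
      obtain ⟨d, t, hdt⟩ : ∃ d t, (c0 :: s').reverse = d :: t := by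
        cases hh : (c0 :: s').reverse with
        | nil => exact absurd hh (by simp)
        | cons d t => exact ⟨d, t, rfl⟩
      rw [hdt]
      by_cases hcont : w.contains d = true
      · have hstep : pvAltStep w d 2 = none := by
          unfold pvAltStep
          rw [if_pos (by omega)]
        have hcm : d ∈ w := by simpa using hcont
        simp [pvAltGo, hcm, hstep]
      · rw [Bool.not_eq_true] at hcont
        have hcm : d ∉ w := by simpa using hcont
        simp [pvAltGo, hcm]

-- ===== VERDICT (by name: the statement is the Claim_ definition above) =====
theorem CyclesToSynth_spec : Claim_equal_CyclesToSynth := by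
  intro seq word V _ _
  unfold Spec_CyclesToSynth
  exact CyclesToSynth_key seq word V
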